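-- pv_equiv track=rewrite | github.com/Spelis/CatSh | main.py | mini_join_between
-- ===== SOURCE A (Python) =====
-- def mini_join_between(lst, one, two):
--     new = []
--     is_in = False
--     temp = []
--     count = 0
--     for i in lst:
--         if not is_in:
--             if i.startswith(one):
--                 temp.append(i)
--                 is_in = True
--                 count += 1
--             else:
--                 new.append(i)
--         else:
--             if i.endswith(two):
--                 temp.append(i)
--                 count -= 1
--                 if count == 0:
--                     new.append(" ".join(temp))
--                     temp = []
--                     is_in = False
--             else:
--                 temp.append(i)
--     return new
-- ===== SOURCE B (Python) =====
-- def mini_join_between(lst, one, two):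
--     out = []
--     i = 0
--     n = len(lst)
--     while i < n:
--         tok = lst[i]
--         if not tok.startswith(one):
--             out.append(tok)
--             i += 1
--             continue
--         # open a group: scan forward for the closer
--         j = i + 1
--         while j < n and not lst[j].endswith(two):
--             j += 1
--         if j == n:
--             break  # unclosed group: drop it and stop
--         out.append(" ".join(lst[i:j + 1]))
--         i = j + 1
--     return out
-- ===== Notes on version B (the rewrite author's own statement) =====
-- stated objective: alternative
-- what changed: Replaces A's single-pass state machine (is_in/temp/count flags carried across iterations) with an index-free two-level structure: an outer walk that, on an opening token, calls an inner forward scan for the closing token and joins the whole slice at once, dropping an unclosed trailing group by stopping.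
import Mathlib
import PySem

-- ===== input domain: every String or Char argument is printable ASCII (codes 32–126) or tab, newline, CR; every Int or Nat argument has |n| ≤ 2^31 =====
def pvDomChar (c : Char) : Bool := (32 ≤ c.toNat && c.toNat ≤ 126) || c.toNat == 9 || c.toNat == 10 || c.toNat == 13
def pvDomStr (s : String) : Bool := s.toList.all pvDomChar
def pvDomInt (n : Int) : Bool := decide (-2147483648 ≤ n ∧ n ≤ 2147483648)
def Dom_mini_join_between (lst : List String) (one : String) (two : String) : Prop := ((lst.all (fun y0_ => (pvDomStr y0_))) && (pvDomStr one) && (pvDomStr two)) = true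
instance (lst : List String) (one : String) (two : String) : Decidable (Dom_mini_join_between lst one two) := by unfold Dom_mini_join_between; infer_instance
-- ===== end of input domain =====

-- B restructures A's flag-driven state machine into an outer walk with an inner
-- forward scan for the group closer (same values; objective: alternative).

-- ===== PORT A =====
-- one fold step = one iteration of A's for-loop over the state (new, is_in, temp, count)
def pvStepA (one two : String) (st : List String × Bool × List String × Int) (i : String) :
    List String × Bool × List String × Int :=
  match st with
  | (new, is_in, temp, count) =>
    if !is_in then
      if PySem.Str.startswith i one then (new, true, temp ++ [i], count + 1)
      else (new ++ [i], is_in, temp, count)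
    else
      if PySem.Str.endswith i two then
        if count - 1 = 0 then (new ++ [PySem.Str.join " " (temp ++ [i])], false, [], count - 1)
        else (new, is_in, temp ++ [i], count - 1)
      else (new, is_in, temp ++ [i], count)

def mini_join_between (lst : List String) (one : String) (two : String) : List String :=
  (lst.foldl (pvStepA one two) ([], false, [], 0)).1

-- ===== PORT B =====
-- the inner 'while j < n and not lst[j].endswith(two)' scan: returns the rest of the
-- group (up to and including the closer) and the remainder of the list, or none if
-- the scan runs off the end
def pvScanB (two : String) : List String → Option (List String × List String)
  | [] => none
  | y :: rest =>
    if PySem.Str.endswith y two then some ([y], rest)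
    else
      match pvScanB two rest with
      | none => none
      | some (g, r) => some (y :: g, r)

theorem pvScanB_len (two : String) (l : List String) (g r : List String)
    (h : pvScanB two l = some (g, r)) : r.length < l.length := by
  induction l generalizing g r with
  | nil => simp [pvScanB] at h
  | cons y rest ih =>
    simp only [pvScanB] at h
    split at h
    · cases h; simp
    · cases hs : pvScanB two rest with
      | none => simp [hs] at h
      | some p =>
        obtain ⟨g', r'⟩ := p
        rw [hs] at h
        cases h
        exact Nat.lt_trans (ih _ _ hs) (by simp)

-- the outer 'while i < n' walk
def pvGoB (one two : String) : List String → List String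
  | [] => []
  | x :: rest =>
    if PySem.Str.startswith x one then
      match h : pvScanB two rest with
      | none => []
      | some (g, r) => PySem.Str.join " " (x :: g) :: pvGoB one two r
    else x :: pvGoB one two rest
  termination_by l => l.length
  decreasing_by
  · exact Nat.lt_trans (pvScanB_len two rest _ _ h) (by simp)
  · simp

def mini_join_between_alt (lst : List String) (one : String) (two : String) : List String :=
  pvGoB one two lst

-- ===== PRECONDITION & SPEC =====
def Spec_mini_join_between (lst : List String) (one : String) (two : String) (out : List String) : Prop := out = mini_join_between_alt lst one two
instance (lst : List String) (one : String) (two : String) (out : List String) : Decidable (Spec_mini_join_between lst one two out) := by unfold Spec_mini_join_between; infer_instance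

-- ===== CLAIM (what is proved, stated in full; the proofs are below) =====
def Claim_equal_mini_join_between : Prop := ∀ (lst : List String) (one : String) (two : String), Dom_mini_join_between lst one two → Spec_mini_join_between lst one two (mini_join_between lst one two)

-- ===== LEMMAS AND PROOFS =====

-- joint loop invariant: from a closed state A's fold emits B's outer walk; from an
-- open state (is_in = true, count = 1) it emits B's inner scan result
theorem pv_joint (one two : String) (l : List String) :
    (∀ new, (l.foldl (pvStepA one two) (new, false, [], 0)).1 = new ++ pvGoB one two l) ∧
    (∀ new temp, (l.foldl (pvStepA one two) (new, true, temp, 1)).1 =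
      new ++ (match pvScanB two l with
              | none => []
              | some (g, r) => PySem.Str.join " " (temp ++ g) :: pvGoB one two r)) := by
  induction l with
  | nil => constructor <;> intros <;> simp [pvGoB, pvScanB]
  | cons x rest ih =>
    constructor
    · intro new
      by_cases hs : PySem.Str.startswith x one
      · have h2 := ih.2 new [x]
        simp only [List.foldl_cons, pvStepA, hs, Bool.not_false, reduceIte, List.nil_append,
          zero_add]
        rw [h2, pvGoB]
        simp only [hs, reduceIte]
        cases h : pvScanB two rest <;> simp_all
      · have h1 := ih.1 (new ++ [x])
        simp only [List.foldl_cons, pvStepA, hs, Bool.not_false, Bool.false_eq_true, reduceIte]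
        rw [h1, pvGoB, if_neg hs]
        simp
    · intro new temp
      by_cases he : PySem.Str.endswith x two
      · have h1 := ih.1 (new ++ [PySem.Str.join " " (temp ++ [x])])
        simp only [List.foldl_cons, pvStepA, he, Bool.not_true, Bool.false_eq_true, reduceIte, sub_self]
        rw [h1]
        simp only [pvScanB, he, reduceIte]
        simp
      · have h2 := ih.2 new (temp ++ [x])
        simp only [List.foldl_cons, pvStepA, he, Bool.not_true, Bool.false_eq_true, reduceIte]
        rw [h2]
        simp only [pvScanB, he, Bool.false_eq_true, reduceIte]
        cases h : pvScanB two rest with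
        | none => simp
        | some p => obtain ⟨g, r⟩ := p; simp

-- ===== VERDICT (by name: the statement is the Claim_ definition above) =====
theorem mini_join_between_spec : Claim_equal_mini_join_between := by
  intro lst one two _
  unfold Spec_mini_join_between mini_join_between mini_join_between_alt
  simpa using (pv_joint one two lst).1 []
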